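-- pv_equiv track=rewrite | github.com/NutriCuisine/NERonLLM | ner/helper/predict_solo.py | convert_ner_to_template
-- ===== SOURCE A (Python) =====
-- from typing import List, Dict
--
-- RECIPE_TOKENS = {
--     'HIGH_PROTEIN': '<high-protein>',
--     'LOW_CARB': '<low-carb>',
--     'HEALTHY': '<healthy>',
--     'VEGAN': '<vegan>'
-- }
--
-- def convert_ner_to_template(ner_predictions: List[List[Dict[str, str]]]) -> List[dict]:
--     """
--     Converts NER predictions to a template format, focusing only on FOOD, QUANTITY, and UNIT tags.
--     """
--     TARGET_LABELS = {'FOOD', 'QUANTITY', 'UNIT'}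
--     results = []
--
--     for sentence_predictions in ner_predictions:
--         # Reconstruct full text
--         full_text = ' '.join(list(word.keys())[0] for word in sentence_predictions)
--
--         # Initialize template components
--         template_words = []
--         target_words = []
--         extra_id_counter = 0
--
--         i = 0
--         while i < len(sentence_predictions):
--             word_dict = sentence_predictions[i]
--             word = list(word_dict.keys())[0]
--             label = list(word_dict.values())[0]
--             base_label = label.split('-')[-1] if '-' in label else label
--
--             # Only process if it's one of our target labels
--             if base_label in TARGET_LABELS and (label.startswith('B-') or label.startswith('I-')):
--                 entity_words = [word]
--                 current_label = base_label
--
--                 # Look ahead for continuation of entity (I- tags)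
--                 j = i + 1
--                 while j < len(sentence_predictions):
--                     next_word_dict = sentence_predictions[j]
--                     next_word = list(next_word_dict.keys())[0]
--                     next_label = list(next_word_dict.values())[0]
--                     next_base_label = next_label.split('-')[-1] if '-' in next_label else next_label
--
--                     if next_label.startswith('I-') and next_base_label == current_label:
--                         entity_words.append(next_word)
--                         j += 1
--                     else:
--                         break
--
--                 # Add to templates
--                 template_words.append(f"<extra_id_{extra_id_counter}>")
--                 target_words.append(f"<extra_id_{extra_id_counter}> {' '.join(entity_words)}")
--                 extra_id_counter += 1
--                 i = j
--
--             else: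
--                 template_words.append(word)
--                 i += 1
--
--         # Build final input and target texts
--         input_text = f"{RECIPE_TOKENS['HIGH_PROTEIN']} {' '.join(template_words)}"
--         target_text = ' '.join(target_words)
--
--         results.append({
--             'full_text': full_text,
--             'input_text': input_text,
--             'target_text': target_text
--         })
--
--     return results
-- ===== SOURCE B (Python) =====
-- from typing import List, Dict
--
-- RECIPE_TOKENS = {
--     'HIGH_PROTEIN': '<high-protein>',
--     'LOW_CARB': '<low-carb>',
--     'HEALTHY': '<healthy>',
--     'VEGAN': '<vegan>'
-- }
--
-- def convert_ner_to_template(ner_predictions: List[List[Dict[str, str]]]) -> List[dict]: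
--     """Single flat pass per sentence carrying an open-entity buffer (no inner look-ahead loop)."""
--     TARGET_LABELS = {'FOOD', 'QUANTITY', 'UNIT'}
--     results = []
--     for sentence_predictions in ner_predictions:
--         full_text = ' '.join(list(w.keys())[0] for w in sentence_predictions)
--         template_words = []
--         target_words = []
--         counter = 0
--         open_label = None
--         buf = []
--
--         def flush():
--             nonlocal counter, open_label, buf
--             if open_label is not None:
--                 tag = f"<extra_id_{counter}>"
--                 template_words.append(tag)
--                 target_words.append(f"{tag} {' '.join(buf)}")
--                 counter += 1
--                 open_label, buf = None, []
--
--         for word_dict in sentence_predictions: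
--             word = list(word_dict.keys())[0]
--             label = list(word_dict.values())[0]
--             base = label.split('-')[-1] if '-' in label else label
--             if label.startswith('I-') and open_label == base:
--                 buf.append(word)
--             elif base in TARGET_LABELS and label.startswith(('B-', 'I-')):
--                 flush()
--                 open_label, buf = base, [word]
--             else:
--                 flush()
--                 template_words.append(word)
--         flush()
--
--         results.append({
--             'full_text': full_text,
--             'input_text': f"{RECIPE_TOKENS['HIGH_PROTEIN']} {' '.join(template_words)}",
--             'target_text': ' '.join(target_words),
--         })
--     return results
-- ===== Notes on version B (the rewrite author's own statement) =====
-- stated objective: simpler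
-- what changed: Replaced A's outer while loop with an inner look-ahead while (index jumping i = j) by one flat loop over the tokens that carries an open-entity buffer and flushes it when the entity ends.
import Mathlib
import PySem

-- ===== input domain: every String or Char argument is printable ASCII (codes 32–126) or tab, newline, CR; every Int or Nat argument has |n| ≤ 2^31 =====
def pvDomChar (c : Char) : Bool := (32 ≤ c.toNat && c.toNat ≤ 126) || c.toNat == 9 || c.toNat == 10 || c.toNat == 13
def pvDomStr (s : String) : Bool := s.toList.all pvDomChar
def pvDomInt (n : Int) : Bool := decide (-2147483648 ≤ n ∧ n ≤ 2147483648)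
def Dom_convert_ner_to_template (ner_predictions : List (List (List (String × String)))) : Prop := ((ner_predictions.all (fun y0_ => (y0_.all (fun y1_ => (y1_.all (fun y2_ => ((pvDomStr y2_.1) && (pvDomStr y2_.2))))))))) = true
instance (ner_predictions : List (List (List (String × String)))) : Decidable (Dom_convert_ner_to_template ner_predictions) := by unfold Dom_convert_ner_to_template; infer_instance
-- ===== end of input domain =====

-- B replaces A's outer-while-plus-inner-look-ahead with one flat fold carrying an open-entity
-- buffer (objective: simpler single-pass decomposition; same asymptotic cost).

-- ===== PORT A =====
-- helpers shared by both ports (both Pythons contain these exact sub-expressions):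
-- list(word_dict.keys())[0] / list(word_dict.values())[0]  (Pre_ excludes the empty dict, where Python raises IndexError)
def pvWord (w : List (String × String)) : String := ((PySem.Dict.ofList w).keys).headD ""
def pvLbl (w : List (String × String)) : String := ((PySem.Dict.ofList w).values).headD ""
-- label.split('-')[-1] if '-' in label else label
def pvBase (label : String) : String :=
  if PySem.Str.isIn "-" label then ((PySem.Str.split? label "-").getD [label]).getLastD label else label
-- base_label in TARGET_LABELS and (label.startswith('B-') or label.startswith('I-'))
def pvIsTarget (label : String) : Bool :=
  decide (pvBase label ∈ (["FOOD", "QUANTITY", "UNIT"] : List String)) &&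
    (PySem.Str.startswith label "B-" || PySem.Str.startswith label "I-")

-- A's inner look-ahead while loop: collected continuation words and the remaining suffix (= index j)
def pvGather (cur : String) : List (List (String × String)) → List String × List (List (String × String))
  | [] => ([], [])
  | w :: rest =>
    let lbl := pvLbl w
    if PySem.Str.startswith lbl "I-" && (pvBase lbl == cur) then
      let p := pvGather cur rest
      (pvWord w :: p.1, p.2)
    else ([], w :: rest)

theorem pvGather_length_le (cur : String) (l : List (List (String × String))) :
    (pvGather cur l).2.length ≤ l.length := by
  induction l with
  | nil => simp [pvGather]
  | cons w rest ih =>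
    simp only [pvGather]
    split
    · exact Nat.le_succ_of_le ih
    · simp

-- A's outer while loop, accumulating (template_words, target_words)
def pvALoop (cnt : Int) : List (List (String × String)) → List String × List String
  | [] => ([], [])
  | w :: rest =>
    let word := pvWord w
    let lbl := pvLbl w
    if pvIsTarget lbl then
      let g := pvGather (pvBase lbl) rest
      let tag := "<extra_id_" ++ PySem.Int.toStr cnt ++ ">"
      let p := pvALoop (cnt + 1) g.2
      (tag :: p.1, (tag ++ " " ++ PySem.Str.join " " (word :: g.1)) :: p.2)
    else
      let p := pvALoop cnt rest
      (word :: p.1, p.2)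
termination_by l => l.length
decreasing_by
  · have := pvGather_length_le (pvBase (pvLbl w)) rest; simp; omega
  · simp

def convert_ner_to_template (ner_predictions : List (List (List (String × String)))) : List (List (String × String)) :=
  ner_predictions.map (fun sp =>
    let full_text := PySem.Str.join " " (sp.map pvWord)
    let p := pvALoop 0 sp
    [("full_text", full_text),
     ("input_text", "<high-protein> " ++ PySem.Str.join " " p.1),
     ("target_text", PySem.Str.join " " p.2)])

-- ===== PORT B =====
-- state: (template_words, target_words, extra_id_counter, open entity = (label, buffered words))
def pvFlush (st : List String × List String × Int × Option (String × List String)) :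
    List String × List String × Int × Option (String × List String) :=
  match st with
  | (tmpl, tgt, cnt, none) => (tmpl, tgt, cnt, none)
  | (tmpl, tgt, cnt, some (_, buf)) =>
    let tag := "<extra_id_" ++ PySem.Int.toStr cnt ++ ">"
    (tmpl ++ [tag], tgt ++ [tag ++ " " ++ PySem.Str.join " " buf], cnt + 1, none)

-- the elif/else branches of Source B, acting on an already flushed (open_label = None) state
def pvBAct (st : List String × List String × Int × Option (String × List String))
    (word lbl base : String) : List String × List String × Int × Option (String × List String) :=
  match st with
  | (tmpl, tgt, cnt, _) =>
    if pvIsTarget lbl then (tmpl, tgt, cnt, some (base, [word]))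
    else (tmpl ++ [word], tgt, cnt, none)

def pvBStep (st : List String × List String × Int × Option (String × List String))
    (w : List (String × String)) : List String × List String × Int × Option (String × List String) :=
  let word := pvWord w
  let lbl := pvLbl w
  let base := pvBase lbl
  match st with
  | (tmpl, tgt, cnt, some (ol, buf)) =>
    if PySem.Str.startswith lbl "I-" && (ol == base) then
      (tmpl, tgt, cnt, some (ol, buf ++ [word]))
    else
      pvBAct (pvFlush (tmpl, tgt, cnt, some (ol, buf))) word lbl base
  | (tmpl, tgt, cnt, none) =>
    pvBAct (tmpl, tgt, cnt, none) word lbl base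

def convert_ner_to_template_alt (ner_predictions : List (List (List (String × String)))) : List (List (String × String)) :=
  ner_predictions.map (fun sp =>
    let full_text := PySem.Str.join " " (sp.map pvWord)
    match pvFlush (sp.foldl pvBStep ([], [], 0, none)) with
    | (tmpl, tgt, _, _) =>
      [("full_text", full_text),
       ("input_text", "<high-protein> " ++ PySem.Str.join " " tmpl),
       ("target_text", PySem.Str.join " " tgt)])

-- ===== PRECONDITION & SPEC =====
-- Pre_ excludes inputs containing an empty word dict, on which A raises IndexError
-- (list(word.keys())[0] of an empty dict); B raises there too.
def Pre_convert_ner_to_template (ner_predictions : List (List (List (String × String)))) : Prop :=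
  (ner_predictions.all (fun s => s.all (fun w => !w.isEmpty))) = true
instance (ner_predictions : List (List (List (String × String)))) : Decidable (Pre_convert_ner_to_template ner_predictions) := by unfold Pre_convert_ner_to_template; infer_instance

def pvWitness_convert_ner_to_template : (List (List (List (String × String)))) :=
  [[[("Add", "O")], [("2", "B-QUANTITY")], [("cups", "B-UNIT")], [("whole", "B-FOOD")], [("wheat", "I-FOOD")]]]

def Spec_convert_ner_to_template (ner_predictions : List (List (List (String × String)))) (out : List (List (String × String))) : Prop := out = convert_ner_to_template_alt ner_predictions
instance (ner_predictions : List (List (List (String × String)))) (out : List (List (String × String))) : Decidable (Spec_convert_ner_to_template ner_predictions out) := by unfold Spec_convert_ner_to_template; infer_instance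

-- ===== CLAIM (what is proved, stated in full; the proofs are below) =====
def Claim_equal_convert_ner_to_template : Prop := ∀ (ner_predictions : List (List (List (String × String)))), Dom_convert_ner_to_template ner_predictions → Pre_convert_ner_to_template ner_predictions → Spec_convert_ner_to_template ner_predictions (convert_ner_to_template ner_predictions)

-- ===== LEMMAS AND PROOFS =====
-- the two visible components of the final state
def pvOut (st : List String × List String × Int × Option (String × List String)) :
    List String × List String :=
  match pvFlush st with
  | (tmpl, tgt, _, _) => (tmpl, tgt)

theorem pvGather_spec (cur : String) (l : List (List (String × String)))
    (buf tmpl tgt : List String) (cnt : Int) :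
    pvOut (l.foldl pvBStep (tmpl, tgt, cnt, some (cur, buf)))
    = pvOut ((pvGather cur l).2.foldl pvBStep
        (tmpl ++ ["<extra_id_" ++ PySem.Int.toStr cnt ++ ">"],
         tgt ++ ["<extra_id_" ++ PySem.Int.toStr cnt ++ ">" ++ " " ++
                 PySem.Str.join " " (buf ++ (pvGather cur l).1)],
         cnt + 1, none)) := by
  induction l generalizing buf tmpl tgt cnt with
  | nil => simp [pvGather, pvOut, pvFlush]
  | cons w rest ih =>
    by_cases hc : (PySem.Str.startswith (pvLbl w) "I-" && (pvBase (pvLbl w) == cur)) = true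
    · have hc' : (PySem.Str.startswith (pvLbl w) "I-" && (cur == pvBase (pvLbl w))) = true := by
        simp only [Bool.and_eq_true, beq_iff_eq] at hc ⊢
        exact ⟨hc.1, hc.2.symm⟩
      simp only [List.foldl_cons, pvBStep, pvGather, hc, hc', if_pos]
      rw [ih]
      simp
    · have hc' : (PySem.Str.startswith (pvLbl w) "I-" && (cur == pvBase (pvLbl w))) = false := by
        simp only [Bool.and_eq_true, beq_iff_eq, not_and] at hc
        simp only [Bool.and_eq_false_iff]
        by_cases h1 : PySem.Str.startswith (pvLbl w) "I-" = true
        · right; have := hc h1; simp only [beq_eq_false_iff_ne, ne_eq]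
          exact fun h => this h.symm
        · left; simpa using h1
      simp only [List.foldl_cons, pvBStep, pvGather, hc, hc']
      simp only [Bool.false_eq_true, if_false, pvFlush, List.append_nil]
      simp only [List.foldl_cons, pvBStep]

theorem pvMain (n : Nat) : ∀ (l : List (List (String × String))), l.length ≤ n →
    ∀ (cnt : Int) (tmpl tgt : List String),
    pvOut (l.foldl pvBStep (tmpl, tgt, cnt, none))
    = (tmpl ++ (pvALoop cnt l).1, tgt ++ (pvALoop cnt l).2) := by
  induction n with
  | zero =>
    intro l hl cnt tmpl tgt
    have : l = [] := List.length_eq_zero_iff.mp (Nat.le_zero.mp hl)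
    subst this
    simp [pvALoop, pvOut, pvFlush]
  | succ n ih =>
    intro l hl cnt tmpl tgt
    match l with
    | [] => simp [pvALoop, pvOut, pvFlush]
    | w :: rest =>
      simp only [List.length_cons, Nat.succ_le_succ_iff] at hl
      by_cases ht : pvIsTarget (pvLbl w) = true
      · simp only [List.foldl_cons, pvBStep, pvBAct, ht, if_pos]
        rw [pvGather_spec]
        have hlen : (pvGather (pvBase (pvLbl w)) rest).2.length ≤ n :=
          le_trans (pvGather_length_le _ _) hl
        rw [ih _ hlen]
        simp only [pvALoop, ht, if_pos]
        simp
      · simp only [List.foldl_cons, pvBStep, pvBAct, ht]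
        simp only [Bool.false_eq_true, if_false]
        rw [ih rest hl]
        simp only [pvALoop, ht]
        simp

-- ===== VERDICT (by name: the statement is the Claim_ definition above) =====
theorem convert_ner_to_template_spec : Claim_equal_convert_ner_to_template := by
  intro ner _ _
  unfold Spec_convert_ner_to_template convert_ner_to_template convert_ner_to_template_alt
  apply List.map_congr_left
  intro sp _
  have h := pvMain sp.length sp le_rfl 0 [] []
  simp only [List.nil_append] at h
  simp only [pvOut] at h
  rcases hst : pvFlush (sp.foldl pvBStep ([], [], 0, none)) with ⟨tmpl, tgt, c, op⟩
  rw [hst] at h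
  simp only at h
  have h1 : tmpl = (pvALoop 0 sp).1 := congrArg Prod.fst h
  have h2 : tgt = (pvALoop 0 sp).2 := congrArg Prod.snd h
  simp [h1, h2]
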